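-- pv_equiv track=rewrite | github.com/vlad1zzzy/ITMO | 1 course/discrete-math/Lab1/C.py | isNotMono
-- ===== SOURCE A (Python) =====
-- def isNotMono(f, s):
-- 	m = len(f)
-- 	delim = m//2
-- 	ind = 1
-- 	for i in range(int(s)):
-- 		k = 0
-- 		for j in range(ind):
-- 			for l in range(delim):
-- 				if f[l+k] > f[l+delim+k]:
-- 					return True
-- 			k += delim*2
-- 		ind *= 2
-- 		delim //= 2
-- 	return False
-- ===== SOURCE B (Python) =====
-- def isNotMono(f, s):
--     # Reshape f into d-sized chunks and compare consecutive chunk pairs elementwise,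
--     # instead of A's block/offset index arithmetic.
--     def chunked(xs, d):
--         out = []
--         while xs:
--             out.append(xs[:d])
--             xs = xs[d:]
--         return out
--
--     def pair_up(cs):
--         out = []
--         while len(cs) >= 2:
--             out.append((cs[0], cs[1]))
--             cs = cs[2:]
--         return out
--
--     d, p = len(f) // 2, 1
--     for _ in range(int(s)):
--         if d and any(a > b
--                      for lo, hi in pair_up(chunked(f, d))[:p]
--                      for a, b in zip(lo, hi)):
--             return True
--         d, p = d // 2, 2 * p
--     return False
-- ===== Notes on version B (the rewrite author's own statement) =====
-- stated objective: alternative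
-- what changed: Replaces A's triple-nested loop with (k, ind, delim) block/offset index bookkeeping by a reshape-and-zip decomposition: each round slices f into delim-sized chunks, pairs consecutive chunks, and compares each of the first ind pairs elementwise via zip, so no comparison index is ever computed.
import Mathlib
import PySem

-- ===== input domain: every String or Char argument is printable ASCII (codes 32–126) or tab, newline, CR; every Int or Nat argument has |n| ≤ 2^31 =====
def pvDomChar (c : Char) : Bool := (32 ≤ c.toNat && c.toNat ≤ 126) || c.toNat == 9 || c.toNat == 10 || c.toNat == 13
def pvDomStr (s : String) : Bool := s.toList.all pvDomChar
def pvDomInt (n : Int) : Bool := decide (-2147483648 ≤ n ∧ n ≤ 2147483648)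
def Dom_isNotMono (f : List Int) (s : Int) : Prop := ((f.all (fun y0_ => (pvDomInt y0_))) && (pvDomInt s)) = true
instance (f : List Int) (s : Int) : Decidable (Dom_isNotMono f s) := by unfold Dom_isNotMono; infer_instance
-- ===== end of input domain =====

-- B replaces A's triple-nested block/offset index arithmetic by a reshape: slice f into
-- d-sized chunks, pair consecutive chunks, and compare each pair elementwise with zip.
-- Objective: alternative decomposition, same cost.

-- ===== PORT A =====
-- transliteration of A: nested loops (rounds / blocks with offset k / l within block).
-- Python f[idx] ported as PySem.List.pyGetD … 0: every index A forms is provably in range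
-- (max index l+delim+k = 2*ind*delim-1 < len f), so Python never raises here and the default is never used.
def pyIsNotMonoJ (f : List Int) (delim k : Nat) : Nat → Bool
  | 0 => false
  | Nat.succ j =>
      if (List.range delim).any (fun l =>
            decide (PySem.List.pyGetD f (↑(l + k)) 0 > PySem.List.pyGetD f (↑(l + delim + k)) 0)) then
        true
      else
        pyIsNotMonoJ f delim (k + delim * 2) j

def pyIsNotMonoOuter (f : List Int) (delim ind : Nat) : Nat → Bool
  | 0 => false
  | Nat.succ i =>
      if pyIsNotMonoJ f delim 0 ind then true
      else pyIsNotMonoOuter f (delim / 2) (ind * 2) i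

def isNotMono (f : List Int) (s : Int) : Bool :=
  pyIsNotMonoOuter f (f.length / 2) 1 s.toNat

-- ===== PORT B =====
-- transliteration of Source B: chunked (while loop consuming xs by slices; only called with 0 < d,
-- which is also what makes it terminate), pair_up, and the outer for-loop over int(s) rounds.
def pvChunked (xs : List Int) (d : Nat) (hd : 0 < d) : List (List Int) :=
  if hnil : xs = [] then []
  else
    PySem.List.slice xs none (some (d : Int)) ::
      pvChunked (PySem.List.slice xs (some (d : Int)) none) d hd
termination_by xs.length
decreasing_by
  rw [PySem.List.slice_from_natCast]
  have : xs.length ≠ 0 := fun h0 => hnil (List.eq_nil_of_length_eq_zero h0)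
  simp; omega

def pvPairUp : List (List Int) → List (List Int × List Int)
  | a :: b :: rest => (a, b) :: pvPairUp rest
  | _ => []

def pvAltRound (f : List Int) (d p : Nat) (hd : 0 < d) : Bool :=
  ((pvPairUp (pvChunked f d hd)).take p).any
    (fun q => (q.1.zip q.2).any (fun ab => decide (ab.1 > ab.2)))

def pvAltGo (f : List Int) (d p : Nat) : Nat → Bool
  | 0 => false
  | Nat.succ n =>
      if hd : d = 0 then pvAltGo f (d / 2) (2 * p) n
      else if pvAltRound f d p (Nat.pos_of_ne_zero hd) then true
      else pvAltGo f (d / 2) (2 * p) n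

def isNotMono_alt (f : List Int) (s : Int) : Bool :=
  pvAltGo f (f.length / 2) 1 s.toNat

-- ===== PRECONDITION & SPEC =====
def Spec_isNotMono (f : List Int) (s : Int) (out : Bool) : Prop := out = isNotMono_alt f s
instance (f : List Int) (s : Int) (out : Bool) : Decidable (Spec_isNotMono f s out) := by unfold Spec_isNotMono; infer_instance

-- ===== CLAIM (what is proved, stated in full; the proofs are below) =====
def Claim_equal_isNotMono : Prop := ∀ (f : List Int) (s : Int), Dom_isNotMono f s → Spec_isNotMono f s (isNotMono f s)

-- ===== LEMMAS AND PROOFS =====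

lemma pvChunked_cons (xs : List Int) (d : Nat) (hd : 0 < d) (h : xs ≠ []) :
    pvChunked xs d hd = xs.take d :: pvChunked (xs.drop d) d hd := by
  rw [pvChunked]
  simp [h, PySem.List.slice_to_natCast, PySem.List.slice_from_natCast]

lemma pvZipAny (f : List Int) (off d : Nat) (h : off + 2 * d ≤ f.length) :
    (((f.drop off).take d).zip (((f.drop off).drop d).take d)).any
        (fun ab => decide (ab.1 > ab.2))
      = (List.range d).any (fun l =>
          decide (PySem.List.pyGetD f (↑(l + off)) 0 > PySem.List.pyGetD f (↑(l + d + off)) 0)) := by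
  have h1 : ((f.drop off).take d).length = d := by simp; omega
  have h2 : (((f.drop off).drop d).take d).length = d := by simp; omega
  apply Bool.eq_iff_iff.mpr
  rw [List.any_eq_true, List.any_eq_true]
  constructor
  · rintro ⟨ab, hm, hab⟩
    rcases List.mem_iff_getElem.mp hm with ⟨l, hl, hget⟩
    have hl' : l < d := by
      have := List.length_zip (l₁ := (f.drop off).take d) (l₂ := ((f.drop off).drop d).take d)
      omega
    refine ⟨l, List.mem_range.mpr hl', ?_⟩
    rw [List.getElem_zip] at hget
    have e1 : ((f.drop off).take d)[l]'(by omega) = f[off + l]'(by omega) := by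
      simp [List.getElem_take, List.getElem_drop]
    have e2 : (((f.drop off).drop d).take d)[l]'(by omega) = f[off + d + l]'(by omega) := by
      simp [List.getElem_take, List.getElem_drop]
    have hv : f[off + l]'(by omega) > f[off + d + l]'(by omega) := by
      rw [← e1, ← e2]; rw [← hget] at hab; exact of_decide_eq_true hab
    apply decide_eq_true
    rw [PySem.List.pyGetD_natCast, PySem.List.pyGetD_natCast,
        List.getD_eq_getElem _ _ (by omega : l + off < f.length),
        List.getD_eq_getElem _ _ (by omega : l + d + off < f.length)]
    have c1 : l + off = off + l := by omega
    have c2 : l + d + off = off + d + l := by omega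
    simp_rw [c1, c2]
    exact hv
  · rintro ⟨l, hl, hv⟩
    have hl' : l < d := List.mem_range.mp hl
    refine ⟨(((f.drop off).take d)[l]'(by omega), (((f.drop off).drop d).take d)[l]'(by omega)), ?_, ?_⟩
    · rw [List.mem_iff_getElem]
      refine ⟨l, by rw [List.length_zip]; omega, ?_⟩
      rw [List.getElem_zip]
    · apply decide_eq_true
      have e1 : ((f.drop off).take d)[l]'(by omega) = f[off + l]'(by omega) := by
        simp [List.getElem_take, List.getElem_drop]
      have e2 : (((f.drop off).drop d).take d)[l]'(by omega) = f[off + d + l]'(by omega) := by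
        simp [List.getElem_take, List.getElem_drop]
      rw [e1, e2]
      have hv' := of_decide_eq_true hv
      rw [PySem.List.pyGetD_natCast, PySem.List.pyGetD_natCast,
          List.getD_eq_getElem _ _ (by omega : l + off < f.length),
          List.getD_eq_getElem _ _ (by omega : l + d + off < f.length)] at hv'
      have c1 : l + off = off + l := by omega
      have c2 : l + d + off = off + d + l := by omega
      simp_rw [c1, c2] at hv'
      exact hv'

lemma pvAlt_eq_J (f : List Int) (d : Nat) (hd : 0 < d) :
    ∀ (p off : Nat), off + 2 * p * d ≤ f.length →
      ((pvPairUp (pvChunked (f.drop off) d hd)).take p).any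
          (fun q => (q.1.zip q.2).any (fun ab => decide (ab.1 > ab.2)))
        = pyIsNotMonoJ f d off p := by
  intro p
  induction p with
  | zero => intro off _; simp [pyIsNotMonoJ]
  | succ p ih =>
    intro off hlen
    have harith : off + 2 * (p + 1) * d = off + 2 * d + 2 * p * d := by ring
    have hne1 : f.drop off ≠ [] := by
      intro h0
      have := congrArg List.length h0
      simp at this; omega
    have hne2 : (f.drop off).drop d ≠ [] := by
      intro h0
      have := congrArg List.length h0
      simp at this; omega
    rw [pvChunked_cons _ _ _ hne1, pvChunked_cons _ _ _ hne2]
    have hdd : ((f.drop off).drop d).drop d = f.drop (off + 2 * d) := by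
      rw [List.drop_drop, List.drop_drop]; congr 1; omega
    rw [hdd]
    show ((( (f.drop off).take d, ((f.drop off).drop d).take d) ::
        pvPairUp (pvChunked (f.drop (off + 2 * d)) d hd)).take (p + 1)).any _ = _
    rw [List.take_succ_cons, List.any_cons]
    rw [pyIsNotMonoJ]
    rw [pvZipAny f off d (by omega)]
    cases hany : (List.range d).any (fun l =>
        decide (PySem.List.pyGetD f (↑(l + off)) 0 > PySem.List.pyGetD f (↑(l + d + off)) 0)) with
    | true => rfl
    | false =>
      have e : off + d * 2 = off + 2 * d := by omega
      simp only [Bool.false_or, Bool.false_eq_true, if_false, e]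
      exact ih (off + 2 * d) (by omega)

lemma pyIsNotMonoJ_zero (f : List Int) : ∀ (j k : Nat), pyIsNotMonoJ f 0 k j = false := by
  intro j
  induction j with
  | zero => intro k; rfl
  | succ j ih => intro k; simp [pyIsNotMonoJ, ih]

lemma pvOuter_eq (f : List Int) :
    ∀ (n i : Nat), pyIsNotMonoOuter f (f.length / 2 / 2 ^ i) (2 ^ i) n
      = pvAltGo f (f.length / 2 / 2 ^ i) (2 ^ i) n := by
  intro n
  induction n with
  | zero => intro i; rfl
  | succ n ih =>
    intro i
    have hstep : f.length / 2 / 2 ^ i / 2 = f.length / 2 / 2 ^ (i + 1) := by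
      rw [pow_succ, ← Nat.div_div_eq_div_mul]
    have hind : 2 ^ i * 2 = 2 * 2 ^ i := by ring
    by_cases hd : f.length / 2 / 2 ^ i = 0
    · rw [pyIsNotMonoOuter, pvAltGo]
      rw [hd]
      simp only [pyIsNotMonoJ_zero, Bool.false_eq_true, if_false]
      have h0 : f.length / 2 / 2 ^ (i + 1) = 0 := by rw [← hstep, hd]
      have h := ih (i + 1)
      rw [h0, pow_succ] at h
      simp only [Nat.zero_div]
      rw [Nat.mul_comm 2 (2 ^ i)]
      exact h
    · rw [pyIsNotMonoOuter, pvAltGo]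
      rw [dif_neg hd]
      have hbound : 0 + 2 * 2 ^ i * (f.length / 2 / 2 ^ i) ≤ f.length := by
        have h1 : f.length / 2 / 2 ^ i * 2 ^ i ≤ f.length / 2 := Nat.div_mul_le_self _ _
        have h2 : 2 * (f.length / 2) ≤ f.length := by omega
        calc 0 + 2 * 2 ^ i * (f.length / 2 / 2 ^ i)
            = 2 * (f.length / 2 / 2 ^ i * 2 ^ i) := by ring
          _ ≤ 2 * (f.length / 2) := by omega
          _ ≤ f.length := h2
      have hround : pvAltRound f (f.length / 2 / 2 ^ i) (2 ^ i) (Nat.pos_of_ne_zero hd)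
          = pyIsNotMonoJ f (f.length / 2 / 2 ^ i) 0 (2 ^ i) := by
        unfold pvAltRound
        have := pvAlt_eq_J f (f.length / 2 / 2 ^ i) (Nat.pos_of_ne_zero hd) (2 ^ i) 0 hbound
        simpa using this
      rw [hround]
      by_cases hj : pyIsNotMonoJ f (f.length / 2 / 2 ^ i) 0 (2 ^ i) = true
      · simp [hj]
      · simp only [Bool.not_eq_true] at hj
        rw [hj]
        simp only [Bool.false_eq_true, if_false]
        have h := ih (i + 1)
        rw [← hstep, pow_succ] at h
        rw [Nat.mul_comm 2 (2 ^ i)]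
        exact h

-- ===== VERDICT (by name: the statement is the Claim_ definition above) =====
theorem isNotMono_spec : Claim_equal_isNotMono := by
  intro f s _
  unfold Spec_isNotMono isNotMono isNotMono_alt
  have := pvOuter_eq f s.toNat 0
  simpa using this
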